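-- pv_equiv track=rewrite | github.com/Abdomash/allam-challenge | Analyzer.py | get_first_mistake2
-- ===== SOURCE A (Python) =====
-- def get_first_mistake2(comb, ideal, ret_inf=False):
--     no_error = 9999 if ret_inf else -1
--
--     #too_little = len(comb)-1 if ret_inf else -2
--     too_little = len(comb)-1
--     max_match_len = no_error
--     for i in range(len(ideal)):
--         if comb.find(ideal[:i]) in [0,1]: #first or second indexes only, ignore mistakes (khazm)
--             max_match_len = i
--         else:
--             break #we didnt find this size
--
--     #things to look for:
--     #1010 actual, 110 ideal, error in -3
--     #1110 actual, 1010 ideal, error in -3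
--     if max_match_len >= len(comb)-3: #if max_match is in last or before last ok! (check total length tho)
--         if len(comb) > len(ideal)+1: #ignore deleting 1 (110 -> 10), or adding 10
--             return len(ideal) #mistake is in too big of a length
--         if len(comb) < len(ideal): #too short, even after deleting (1110110 -> 1110)
--             return too_little #special meaning too little gen!
--         return no_error
--     else:
--         return max_match_len
-- ===== SOURCE B (Python) =====
-- def get_first_mistake2(comb, ideal, ret_inf=False):
--     no_error = 9999 if ret_inf else -1
--
--     def lcp(a, b):
--         n = 0
--         while n < len(a) and n < len(b) and a[n] == b[n]:
--             n += 1
--         return n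
--
--     if len(ideal) == 0:
--         max_match_len = no_error
--     else:
--         max_match_len = min(len(ideal) - 1,
--                             max(lcp(comb, ideal), lcp(comb[1:], ideal)))
--
--     if max_match_len >= len(comb) - 3:
--         if len(comb) > len(ideal) + 1:
--             return len(ideal)
--         if len(comb) < len(ideal):
--             return len(comb) - 1
--         return no_error
--     return max_match_len
-- ===== Notes on version B (the rewrite author's own statement) =====
-- stated objective: faster
-- what changed: A repeatedly searches comb for every growing prefix ideal[:i] (a substring search per loop iteration); B replaces the whole loop by two linear longest-common-prefix scans (comb vs ideal and comb[1:] vs ideal) and takes min(len(ideal)-1, max of the two), then applies the same final length checks.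
import Mathlib
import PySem

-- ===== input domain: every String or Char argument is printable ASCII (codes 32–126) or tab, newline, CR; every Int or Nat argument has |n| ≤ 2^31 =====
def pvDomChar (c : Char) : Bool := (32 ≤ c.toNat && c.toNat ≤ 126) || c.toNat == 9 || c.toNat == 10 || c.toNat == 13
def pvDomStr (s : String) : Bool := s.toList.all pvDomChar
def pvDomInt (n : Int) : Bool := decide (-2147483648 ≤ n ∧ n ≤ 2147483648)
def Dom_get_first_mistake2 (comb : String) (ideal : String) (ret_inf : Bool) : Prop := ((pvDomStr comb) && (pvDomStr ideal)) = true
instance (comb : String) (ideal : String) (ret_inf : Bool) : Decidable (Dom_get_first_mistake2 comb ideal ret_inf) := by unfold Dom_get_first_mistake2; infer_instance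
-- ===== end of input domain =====

-- B replaces A's per-iteration substring search over growing prefixes by two linear
-- longest-common-prefix scans (objective: faster, asymptotically).

-- ===== PORT A =====
-- the for-loop of A: 'for i in range(len(ideal)): if comb.find(ideal[:i]) in [0,1]: max_match_len = i else: break'
def gfm2_loopA (c idl : List Char) (i : Nat) (mml : Int) : Int :=
  if i < idl.length then
    -- comb.find(ideal[:i]) in [0,1]
    (if PySem.Chars.find c (PySem.List.slice idl none (some (i : Int))) = 0 ∨
        PySem.Chars.find c (PySem.List.slice idl none (some (i : Int))) = 1 then
      gfm2_loopA c idl (i + 1) i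
    else mml)
  else mml
termination_by idl.length - i

def get_first_mistake2 (comb : String) (ideal : String) (ret_inf : Bool) : Int :=
  let c := comb.toList
  let idl := ideal.toList
  let no_error : Int := if ret_inf then 9999 else -1
  let too_little : Int := (c.length : Int) - 1
  let max_match_len : Int := gfm2_loopA c idl 0 no_error
  if max_match_len ≥ (c.length : Int) - 3 then
    if (c.length : Int) > (idl.length : Int) + 1 then (idl.length : Int)
    else if (c.length : Int) < (idl.length : Int) then too_little
    else no_error
  else max_match_len

-- ===== PORT B =====
-- Source B's while-loop lcp scan, as the obvious structural recursion on both lists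
def gfm2_lcp : List Char → List Char → Nat
  | a :: as, b :: bs => if a = b then 1 + gfm2_lcp as bs else 0
  | _, _ => 0

def get_first_mistake2_alt (comb : String) (ideal : String) (ret_inf : Bool) : Int :=
  let c := comb.toList
  let idl := ideal.toList
  let no_error : Int := if ret_inf then 9999 else -1
  let max_match_len : Int :=
    if idl.length = 0 then no_error
    else min ((idl.length : Int) - 1)
             ((max (gfm2_lcp c idl) (gfm2_lcp (PySem.List.slice c (some 1) none) idl) : Nat) : Int)
  if max_match_len ≥ (c.length : Int) - 3 then
    if (c.length : Int) > (idl.length : Int) + 1 then (idl.length : Int)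
    else if (c.length : Int) < (idl.length : Int) then (c.length : Int) - 1
    else no_error
  else max_match_len

-- ===== PRECONDITION & SPEC =====
def Spec_get_first_mistake2 (comb : String) (ideal : String) (ret_inf : Bool) (out : Int) : Prop := out = get_first_mistake2_alt comb ideal ret_inf
instance (comb : String) (ideal : String) (ret_inf : Bool) (out : Int) : Decidable (Spec_get_first_mistake2 comb ideal ret_inf out) := by unfold Spec_get_first_mistake2; infer_instance

-- ===== CLAIM (what is proved, stated in full; the proofs are below) =====
def Claim_equal_get_first_mistake2 : Prop := ∀ (comb : String) (ideal : String) (ret_inf : Bool), Dom_get_first_mistake2 comb ideal ret_inf → Spec_get_first_mistake2 comb ideal ret_inf (get_first_mistake2 comb ideal ret_inf)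

-- ===== LEMMAS AND PROOFS =====

-- find.go either fails (-1) or returns an index ≥ its counter
theorem gfm2_go_aux (sub : List Char) : ∀ (l : List Char) (k : Nat),
    PySem.Chars.find.go sub l k = -1 ∨ (k : Int) ≤ PySem.Chars.find.go sub l k := by
  intro l
  induction l with
  | nil =>
    intro k
    simp only [PySem.Chars.find.go]
    split_ifs with he
    · right; exact le_refl _
    · left; rfl
  | cons h t ih =>
    intro k
    simp only [PySem.Chars.find.go]
    split_ifs with hp
    · right; exact le_refl _
    · rcases ih (k + 1) with h1 | h1
      · left; exact h1
      · right; push_cast at h1; omega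

-- find.go returns its starting counter exactly when the pattern is a prefix
theorem gfm2_go_eq_iff (sub : List Char) : ∀ (l : List Char) (k : Nat),
    PySem.Chars.find.go sub l k = (k : Int) ↔ sub <+: l := by
  intro l
  induction l with
  | nil =>
    intro k
    simp only [PySem.Chars.find.go]
    split_ifs with he
    · simp [List.isEmpty_iff.mp he]
    · constructor
      · intro h; exfalso; omega
      · intro h; exact absurd (List.isEmpty_iff.mpr (List.prefix_nil.mp h)) he
  | cons h t ih =>
    intro k
    simp only [PySem.Chars.find.go]
    split_ifs with hp
    · simp [List.isPrefixOf_iff_prefix.mp hp]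
    · have hnp : ¬ sub <+: (h :: t) := fun hh => hp (List.isPrefixOf_iff_prefix.mpr hh)
      constructor
      · intro he
        exfalso
        rcases gfm2_go_aux sub t (k + 1) with h1 | h1
        · rw [h1] at he; omega
        · rw [he] at h1; push_cast at h1; omega
      · intro hh; exact absurd hh hnp

-- comb.find(sub) ∈ {0,1}  ↔  sub is a prefix of comb or of comb[1:]
theorem gfm2_find01 (c sub : List Char) :
    (PySem.Chars.find c sub = 0 ∨ PySem.Chars.find c sub = 1) ↔
      (sub <+: c ∨ sub <+: c.tail) := by
  cases c with
  | nil =>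
    simp only [PySem.Chars.find, List.tail_nil]
    simp only [PySem.Chars.find.go]
    split_ifs with he
    · simp [List.isEmpty_iff.mp he]
    · constructor
      · rintro (h | h) <;> exact absurd h (by decide)
      · rintro (h | h) <;>
          exact absurd (List.isEmpty_iff.mpr (List.prefix_nil.mp h)) he
  | cons h t =>
    simp only [PySem.Chars.find, List.tail_cons]
    simp only [PySem.Chars.find.go]
    split_ifs with hp
    · simp [List.isPrefixOf_iff_prefix.mp hp]
    · have hnp : ¬ sub <+: (h :: t) := fun hh => hp (List.isPrefixOf_iff_prefix.mpr hh)
      constructor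
      · rintro (h0 | h1)
        · exfalso
          rcases gfm2_go_aux sub t 1 with ha | ha
          · rw [ha] at h0; omega
          · rw [h0] at ha; simp at ha
        · right; exact (gfm2_go_eq_iff sub t 1).mp (by exact_mod_cast h1)
      · rintro (hh | hh)
        · exact absurd hh hnp
        · right; exact_mod_cast (gfm2_go_eq_iff sub t 1).mpr hh

theorem gfm2_lcp_nil_right (a : List Char) : gfm2_lcp a [] = 0 := by
  cases a <;> simp [gfm2_lcp]

-- b.take i is a prefix of a exactly when i ≤ lcp a b (for i within b)
theorem gfm2_take_prefix : ∀ (b a : List Char) (i : Nat), i ≤ b.length →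
    (b.take i <+: a ↔ i ≤ gfm2_lcp a b) := by
  intro b
  induction b with
  | nil =>
    intro a i hi
    have : i = 0 := by simpa using hi
    subst this
    simp [gfm2_lcp_nil_right]
  | cons x bs ih =>
    intro a i hi
    cases i with
    | zero => simp
    | succ j =>
      cases a with
      | nil => simp [gfm2_lcp]
      | cons y as =>
        simp only [List.take_succ_cons, List.cons_prefix_cons, gfm2_lcp]
        by_cases hxy : y = x
        · subst hxy
          have hj : j ≤ bs.length := by simpa using hi
          rw [if_pos rfl]
          have := ih as j hj
          constructor
          · rintro ⟨-, hpre⟩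
            have h2 := this.mp hpre
            omega
          · intro hle
            exact ⟨rfl, this.mpr (by omega)⟩
        · rw [if_neg hxy]
          constructor
          · rintro ⟨h1, -⟩; exact absurd h1.symm hxy
          · intro hle; exact absurd hle (by omega)

-- closed form for A's loop
theorem gfm2_loop_eq (c idl : List Char) :
    ∀ (n i : Nat) (mml : Int), idl.length - i ≤ n →
      gfm2_loopA c idl i mml =
        if i < idl.length ∧ i ≤ max (gfm2_lcp c idl) (gfm2_lcp c.tail idl) then
          min ((idl.length : Int) - 1)
              ((max (gfm2_lcp c idl) (gfm2_lcp c.tail idl) : Nat) : Int)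
        else mml := by
  intro n
  induction n with
  | zero =>
    intro i mml hn
    rw [gfm2_loopA]
    have h1 : ¬ i < idl.length := by omega
    simp [h1]
  | succ n ih =>
    intro i mml hn
    rw [gfm2_loopA]
    by_cases hi : i < idl.length
    · rw [if_pos hi, PySem.List.slice_to_natCast]
      have hcond : (PySem.Chars.find c (idl.take i) = 0 ∨
          PySem.Chars.find c (idl.take i) = 1) ↔
          i ≤ max (gfm2_lcp c idl) (gfm2_lcp c.tail idl) := by
        rw [gfm2_find01,
            gfm2_take_prefix idl c i (le_of_lt hi),
            gfm2_take_prefix idl c.tail i (le_of_lt hi)]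
        omega
      by_cases hm : i ≤ max (gfm2_lcp c idl) (gfm2_lcp c.tail idl)
      · rw [if_pos (hcond.mpr hm), ih (i + 1) i (by omega)]
        by_cases h2 : i + 1 < idl.length ∧
            i + 1 ≤ max (gfm2_lcp c idl) (gfm2_lcp c.tail idl)
        · rw [if_pos h2, if_pos ⟨hi, hm⟩]
        · rw [if_neg h2, if_pos ⟨hi, hm⟩]
          push_cast
          omega
      · rw [if_neg (fun hc => hm (hcond.mp hc)), if_neg (fun hc => hm hc.2)]
    · rw [if_neg hi, if_neg (fun hc => hi hc.1)]

theorem gfm2_main (comb ideal : String) (ret_inf : Bool) :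
    get_first_mistake2 comb ideal ret_inf = get_first_mistake2_alt comb ideal ret_inf := by
  simp only [get_first_mistake2, get_first_mistake2_alt]
  rw [PySem.List.slice_from_one]
  have hloop := gfm2_loop_eq comb.toList ideal.toList ideal.toList.length 0
      (if ret_inf then 9999 else -1) (by omega)
  rw [hloop]
  by_cases hlen : ideal.toList.length = 0
  · simp only [hlen]
    norm_num
  · have h0 : 0 < ideal.toList.length ∧
        0 ≤ max (gfm2_lcp comb.toList ideal.toList)
              (gfm2_lcp comb.toList.tail ideal.toList) := ⟨by omega, by omega⟩
    rw [if_pos h0, if_neg hlen]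

-- ===== VERDICT (by name: the statement is the Claim_ definition above) =====
theorem get_first_mistake2_spec : Claim_equal_get_first_mistake2 := by
  intro comb ideal ret_inf _
  unfold Spec_get_first_mistake2
  exact gfm2_main comb ideal ret_inf
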